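-- pv_equiv track=rewrite | github.com/Riceand/latest_cdm | cdmlib.py | find_first_value_col
-- ===== SOURCE A (Python) =====
-- def find_first_value_col(cols, title):
--     if not cols:
--         return -1
--     start = False # 是否开始查找，从上往下只有找到 title 后，再开始找第一个不为空的值。
--     i = 0
--     for l in cols:
--         if start and l.strip() != '':
--             return i
--         if l == title:
--             start = True
--         i = i + 1
--     return -1
-- ===== SOURCE B (Python) =====
-- def find_first_value_col(cols, title):
--     r = -1   # answer: first non-blank index after the first occurrence of title
--     nb = -1  # first non-blank index at or after the current position's successor
--     for i in range(len(cols) - 1, -1, -1):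
--         l = cols[i]
--         if l == title:
--             r = nb
--         if l.strip() != '':
--             nb = i
--     return r
-- ===== Notes on version B (the rewrite author's own statement) =====
-- stated objective: alternative
-- what changed: Replaces A's forward flag-driven scan with a single right-to-left pass that maintains two accumulators (nearest non-blank index to the right, and the answer latched whenever the title is seen), so the result for the whole list falls out of suffix results without any flag or title search.
import Mathlib
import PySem

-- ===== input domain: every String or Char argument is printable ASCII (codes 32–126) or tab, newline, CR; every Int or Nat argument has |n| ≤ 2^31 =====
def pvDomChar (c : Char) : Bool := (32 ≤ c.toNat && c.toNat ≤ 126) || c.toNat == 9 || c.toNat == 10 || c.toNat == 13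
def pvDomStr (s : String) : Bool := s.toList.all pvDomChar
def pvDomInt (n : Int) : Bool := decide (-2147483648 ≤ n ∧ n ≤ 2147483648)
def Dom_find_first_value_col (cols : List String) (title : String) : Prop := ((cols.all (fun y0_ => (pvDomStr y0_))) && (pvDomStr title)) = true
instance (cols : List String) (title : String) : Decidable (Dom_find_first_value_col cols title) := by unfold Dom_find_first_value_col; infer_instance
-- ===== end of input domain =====

-- B replaces A's forward flag-driven scan by a single right-to-left pass carrying two
-- accumulators (nearest non-blank index to the right, and the latched answer); objective: alternative.

-- ===== PORT A =====
-- A's for-loop over cols with state (start, i); the two ifs in A's order.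
def pvALoop (cols : List String) (title : String) (start : Bool) (i : Int) : Int :=
  match cols with
  | [] => -1
  | l :: rest =>
    if start && (PySem.Str.strip l ≠ "") then i
    else pvALoop rest title (start || (l == title)) (i + 1)

def find_first_value_col (cols : List String) (title : String) : Int :=
  if cols = [] then -1
  else pvALoop cols title false 0

-- ===== PORT B =====
-- the body of B's backward for-loop: state (r, nb), current index i
def pvBStep (cols : List String) (title : String) (st : Int × Int) (i : Int) : Int × Int :=
  let l := PySem.List.pyGetD cols i ""
  (if l == title then st.2 else st.1,
   if PySem.Str.strip l ≠ "" then i else st.2)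

def find_first_value_col_alt (cols : List String) (title : String) : Int :=
  ((PySem.List.pyRange ((cols.length : Int) - 1) (-1) (-1)).foldl
    (pvBStep cols title) (-1, -1)).1

-- ===== PRECONDITION & SPEC =====
def Spec_find_first_value_col (cols : List String) (title : String) (out : Int) : Prop := out = find_first_value_col_alt cols title
instance (cols : List String) (title : String) (out : Int) : Decidable (Spec_find_first_value_col cols title out) := by unfold Spec_find_first_value_col; infer_instance

-- ===== CLAIM (what is proved, stated in full; the proofs are below) =====
def Claim_equal_find_first_value_col : Prop := ∀ (cols : List String) (title : String), Dom_find_first_value_col cols title → Spec_find_first_value_col cols title (find_first_value_col cols title)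

-- ===== LEMMAS AND PROOFS =====

-- Proof-side common form: first non-blank entry of l, reported at offset i.
def pvFstNE (l : List String) (i : Int) : Int :=
  match l with
  | [] => -1
  | x :: xs => if PySem.Str.strip x ≠ "" then i else pvFstNE xs (i + 1)

-- NBspec cols i = first non-blank index ≥ i; Rspec cols title i = A's answer on the suffix from i.
def NBspec (cols : List String) (i : Nat) : Int := pvFstNE (cols.drop i) i

def Rspec (cols : List String) (title : String) (i : Nat) : Int :=
  match PySem.List.index? (cols.drop i) title with
  | none => -1
  | some j => pvFstNE (cols.drop (i + j + 1)) ((i : Int) + j + 1)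

theorem pvALoop_true (l : List String) (title : String) (i : Int) :
    pvALoop l title true i = pvFstNE l i := by
  induction l generalizing i with
  | nil => rfl
  | cons x xs ih => simp only [pvALoop, pvFstNE, Bool.true_and, Bool.true_or]; split <;> simp_all

theorem pvALoop_false (l : List String) (title : String) (i : Int) :
    pvALoop l title false i =
      match PySem.List.index? l title with
      | none => -1
      | some j => pvFstNE (l.drop (j + 1)) (i + j + 1) := by
  induction l generalizing i with
  | nil => rfl
  | cons x xs ih =>
    by_cases hx : x = title
    · subst hx
      rw [PySem.List.index?_cons_self]
      simp only [pvALoop, Bool.false_and, if_neg Bool.false_ne_true, beq_self_eq_true,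
        Bool.false_or, pvALoop_true]
      simp
    · rw [PySem.List.index?_cons_of_ne xs hx]
      simp only [pvALoop, Bool.false_and, Bool.false_or, if_neg Bool.false_ne_true,
        beq_eq_false_iff_ne.mpr hx, ih]
      cases hj : PySem.List.index? xs title with
      | none => simp
      | some j =>
        simp only [Option.map_some, List.drop_succ_cons]
        push_cast
        ring_nf

-- one backward step turns the suffix invariants at cut i+1 into those at cut i
theorem pvBStep_spec (cols : List String) (title : String) (i : Nat) (h : i < cols.length) :
    pvBStep cols title (Rspec cols title (i + 1), NBspec cols (i + 1)) (i : Int)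
      = (Rspec cols title i, NBspec cols i) := by
  have hget : PySem.List.pyGetD cols (i : Int) "" = cols[i] := by
    simp [PySem.List.pyGetD_natCast, List.getD_eq_getElem?_getD, h]
  have hdrop : cols.drop i = cols[i] :: cols.drop (i + 1) := List.drop_eq_getElem_cons h
  simp only [pvBStep, hget]
  rw [Prod.mk.injEq]
  refine ⟨?_, ?_⟩
  · by_cases hx : cols[i] = title
    · simp only [Rspec, hdrop, hx, PySem.List.index?_cons_self, NBspec]
      norm_num
    · have hbeq : ¬((cols[i] == title) = true) := by simp [hx]
      simp only [Rspec, hdrop, PySem.List.index?_cons_of_ne _ hx, if_neg hbeq]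
      cases hj : PySem.List.index? (cols.drop (i + 1)) title with
      | none => simp
      | some j =>
        simp only [Option.map_some]
        have heq : i + (j + 1) + 1 = i + 1 + j + 1 := by omega
        rw [heq]
        push_cast; ring_nf
  · simp only [NBspec, hdrop, pvFstNE]
    split <;> [skip; push_cast] <;> ring_nf

-- folding the countdown range from cut m down to 0 lands on the invariants at cut 0
theorem pvBFold (cols : List String) (title : String) (m : Nat) (hm : m ≤ cols.length) :
    (PySem.List.pyRange ((m : Int) - 1) (-1) (-1)).foldl (pvBStep cols title)
        (Rspec cols title m, NBspec cols m)
      = (Rspec cols title 0, NBspec cols 0) := by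
  induction m with
  | zero => rw [PySem.List.pyRange_neg_one_eq_nil (by norm_num)]; rfl
  | succ k ih =>
    rw [show ((k + 1 : Nat) : Int) - 1 = (k : Int) from by push_cast; ring,
      PySem.List.pyRange_neg_one_cons (by omega)]
    simp only [List.foldl_cons]
    rw [pvBStep_spec cols title k (by omega)]
    exact ih (by omega)

-- ===== VERDICT (by name: the statement is the Claim_ definition above) =====
theorem find_first_value_col_spec : Claim_equal_find_first_value_col := by
  intro cols title _
  unfold Spec_find_first_value_col find_first_value_col find_first_value_col_alt
  have hB : ((PySem.List.pyRange ((cols.length : Int) - 1) (-1) (-1)).foldl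
      (pvBStep cols title) (-1, -1)).1 = Rspec cols title 0 := by
    have h0 : Rspec cols title cols.length = -1 := by
      simp [Rspec, List.drop_length, PySem.List.index?]
    have h1 : NBspec cols cols.length = -1 := by
      simp [NBspec, List.drop_length, pvFstNE]
    have hf := pvBFold cols title cols.length le_rfl
    rw [h0, h1] at hf
    rw [hf]
  rw [hB]
  by_cases hc : cols = []
  · subst hc; rfl
  · rw [if_neg hc, pvALoop_false]
    simp only [Rspec, List.drop_zero]
    cases hj : PySem.List.index? cols title with
    | none => rfl
    | some j =>
      push_cast; ring_nf
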